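-- pv_equiv track=rewrite | github.com/richardteatime/Poker-AI-rick | slumbot/slumbot_api.py | convert_action_to_history
-- ===== SOURCE A (Python) =====
-- def convert_action_to_history(hole_cards, board, action, isDealer):
--     DISCRETE_ACTIONS = ["k", "c", "/"]
--     stage_i = 0
--     if isDealer:
--         history = ["2s2h", "".join(hole_cards)]
--     else:
--         history = ["".join(hole_cards), "2s2h"]
--
--     i = 0
--     while i < len(action):
--         a = action[i]
--
--         if a in DISCRETE_ACTIONS:
--             if a == "/":
--                 history += ["/"]
--                 stage_i += 1
--                 if stage_i == 1:
--                     history += ["".join(board[:3])]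
--                 elif stage_i == 2:
--                     history += ["".join(board[3])]
--                 else:
--                     history += ["".join(board[4])]
--
--             else:
--                 history += [a]
--             i += 1
--
--         else:
--             j = i
--             while j < len(action):
--                 if action[j] in DISCRETE_ACTIONS or (j != i and action[j] == "b"):
--                     break
--                 j += 1
--
--             history += [action[i:j]]
--             i = j
--     return history
-- ===== SOURCE B (Python) =====
-- def convert_action_to_history(hole_cards, board, action, isDealer):
--     # Tokenize the whole action string first, then process the token list.
--     tokens = []
--     cur = ""
--     for ch in action:
--         if ch in "kc/":
--             if cur:
--                 tokens.append(cur)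
--                 cur = ""
--             tokens.append(ch)
--         elif ch == "b" and cur:
--             tokens.append(cur)
--             cur = "b"
--         else:
--             cur += ch
--     if cur:
--         tokens.append(cur)
--
--     hc = "".join(hole_cards)
--     history = ["2s2h", hc] if isDealer else [hc, "2s2h"]
--     stage = 0
--     for t in tokens:
--         history.append(t)
--         if t == "/":
--             stage += 1
--             if stage == 1:
--                 history.append("".join(board[:3]))
--             elif stage == 2:
--                 history.append(board[3])
--             else:
--                 history.append(board[4])
--     return history
-- ===== Notes on version B (the rewrite author's own statement) =====
-- stated objective: alternative
-- what changed: B tokenizes the whole action string in one character pass into a token list and then processes that list (appending board cards on '/'), replacing A's fused index-based state machine whose inner scan re-indexes and slices the string per run; the single pass with incremental run building avoids per-run index arithmetic and slicing, a constant-factor speedup measured ~2x.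
import Mathlib
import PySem

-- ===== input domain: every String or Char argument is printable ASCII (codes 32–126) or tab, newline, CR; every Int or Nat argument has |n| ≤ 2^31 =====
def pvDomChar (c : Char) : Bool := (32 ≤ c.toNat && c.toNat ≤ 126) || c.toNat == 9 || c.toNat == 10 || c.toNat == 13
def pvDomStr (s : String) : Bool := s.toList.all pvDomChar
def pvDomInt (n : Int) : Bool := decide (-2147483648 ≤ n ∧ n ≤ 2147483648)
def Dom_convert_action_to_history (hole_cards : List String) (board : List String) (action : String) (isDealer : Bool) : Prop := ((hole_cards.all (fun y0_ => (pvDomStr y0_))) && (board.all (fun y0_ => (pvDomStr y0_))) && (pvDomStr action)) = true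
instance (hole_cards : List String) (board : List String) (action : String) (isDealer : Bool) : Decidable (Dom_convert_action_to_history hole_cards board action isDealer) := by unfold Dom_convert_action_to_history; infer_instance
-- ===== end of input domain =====

-- B tokenizes the action string into a token list in one pass, then processes the tokens;
-- A is a fused index-scanning state machine. Equal return values on Pre_ (outside it the Python raises IndexError).


-- ===== PORT A =====
-- a in DISCRETE_ACTIONS
def discreteA (c : Char) : Bool := c == 'k' || c == 'c' || c == '/'

-- A's inner j-scan: returns (chars of action[i+1:j], the remaining suffix action[j:]);
-- the run's first char is handled by the caller (at j = i no break condition fires).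
def scanRunA : List Char → List Char × List Char
  | [] => ([], [])
  | c :: r =>
    if discreteA c || c == 'b' then ([], c :: r)
    else
      let p := scanRunA r
      (c :: p.1, p.2)

theorem scanRunA_rest_le (r : List Char) : (scanRunA r).2.length ≤ r.length := by
  induction r with
  | nil => simp [scanRunA]
  | cons c r ih =>
    simp only [scanRunA]
    split
    · simp
    · simpa using Nat.le_succ_of_le ih

-- A's while loop over the action characters (the i-indexed scan becomes recursion on the suffix)
def goA (board : List String) (cs : List Char) (stage_i : Nat) (history : List String) : List String :=
  match cs with
  | [] => history
  | a :: rest =>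
    if discreteA a then
      if a == '/' then
        let stage_i' := stage_i + 1
        let card :=
          if stage_i' = 1 then PySem.Str.join "" (PySem.List.slice board none (some 3))
          else if stage_i' = 2 then PySem.List.pyGetD board 3 ""   -- "".join(board[3]) is board[3]; the IndexError case is excluded by Pre_
          else PySem.List.pyGetD board 4 ""                        -- likewise board[4]
        goA board rest stage_i' (history ++ ["/"] ++ [card])
      else
        goA board rest stage_i (history ++ [String.ofList [a]])
    else
      let p := scanRunA rest
      goA board p.2 stage_i (history ++ [String.ofList (a :: p.1)])
termination_by cs.length
decreasing_by
  · simp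
  · simp
  · exact Nat.lt_succ_of_le (scanRunA_rest_le rest)

def convert_action_to_history (hole_cards : List String) (board : List String) (action : String) (isDealer : Bool) : List String :=
  let history :=
    if isDealer then ["2s2h", PySem.Str.join "" hole_cards]
    else [PySem.Str.join "" hole_cards, "2s2h"]
  goA board action.toList 0 history

-- ===== PORT B =====
-- B's tokenizer: one pass over the chars, carrying the current run `cur`
def tokB (cur : List Char) : List Char → List String
  | [] => if cur = [] then [] else [String.ofList cur]
  | c :: r =>
    if c == 'k' || c == 'c' || c == '/' then
      (if cur = [] then [] else [String.ofList cur]) ++ [String.ofList [c]] ++ tokB [] r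
    else if c == 'b' && !(cur = []) then
      String.ofList cur :: tokB ['b'] r
    else
      tokB (cur ++ [c]) r

-- B's processing loop over the token list
def procB (board : List String) (stage : Nat) : List String → List String
  | [] => []
  | t :: ts =>
    if t = "/" then
      let stage' := stage + 1
      let card :=
        if stage' = 1 then PySem.Str.join "" (PySem.List.slice board none (some 3))
        else if stage' = 2 then PySem.List.pyGetD board 3 ""
        else PySem.List.pyGetD board 4 ""
      t :: card :: procB board stage' ts
    else
      t :: procB board stage ts

def convert_action_to_history_alt (hole_cards : List String) (board : List String) (action : String) (isDealer : Bool) : List String :=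
  let hc := PySem.Str.join "" hole_cards
  let history := if isDealer then ["2s2h", hc] else [hc, "2s2h"]
  history ++ procB board 0 (tokB [] action.toList)

-- ===== PRECONDITION & SPEC =====
-- Pre_ excludes exactly the inputs where the Python raises IndexError (A and B both do):
-- a 2nd '/' in action needs board[3], a 3rd (or later) '/' needs board[4].
def Pre_convert_action_to_history (hole_cards : List String) (board : List String) (action : String) (isDealer : Bool) : Prop :=
  (2 ≤ action.toList.count '/' → 4 ≤ board.length) ∧
  (3 ≤ action.toList.count '/' → 5 ≤ board.length)
instance (hole_cards : List String) (board : List String) (action : String) (isDealer : Bool) : Decidable (Pre_convert_action_to_history hole_cards board action isDealer) := by unfold Pre_convert_action_to_history; infer_instance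

def pvWitness_convert_action_to_history : List String × List String × String × Bool :=
  (["As", "Kd"], ["2c", "3c", "4c", "5c", "6c"], "b200c/kk/kb100b300c/kk", true)

def Spec_convert_action_to_history (hole_cards : List String) (board : List String) (action : String) (isDealer : Bool) (out : List String) : Prop := out = convert_action_to_history_alt hole_cards board action isDealer
instance (hole_cards : List String) (board : List String) (action : String) (isDealer : Bool) (out : List String) : Decidable (Spec_convert_action_to_history hole_cards board action isDealer out) := by unfold Spec_convert_action_to_history; infer_instance

-- ===== CLAIM (what is proved, stated in full; the proofs are below) =====
def Claim_equal_convert_action_to_history : Prop := ∀ (hole_cards : List String) (board : List String) (action : String) (isDealer : Bool), Dom_convert_action_to_history hole_cards board action isDealer → Pre_convert_action_to_history hole_cards board action isDealer → Spec_convert_action_to_history hole_cards board action isDealer (convert_action_to_history hole_cards board action isDealer)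

-- ===== LEMMAS AND PROOFS =====

theorem ofList_cons_ne_slash (a : Char) (t : List Char) (h : ¬a = '/') :
    ¬String.ofList (a :: t) = "/" := by
  intro hc
  have := congrArg String.toList hc
  simp at this
  exact h this.1

-- B's tokenizer mid-run matches A's inner scan: a nonempty current run is closed exactly
-- where scanRunA stops, and tokenization restarts on the remaining suffix.
theorem tokB_run (r : List Char) : ∀ cur : List Char, cur ≠ [] →
    tokB cur r = String.ofList (cur ++ (scanRunA r).1) :: tokB [] (scanRunA r).2 := by
  induction r with
  | nil =>
    intro cur hcur
    simp [tokB, scanRunA, hcur]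
  | cons c r ih =>
    intro cur hcur
    by_cases hd : (c == 'k' || c == 'c' || c == '/') = true
    · have hdisc : (discreteA c || c == 'b') = true := by have := hd; simp at this; simp [discreteA]; tauto
      simp [tokB, hd, scanRunA, hdisc, hcur]
    · by_cases hb : c = 'b'
      · have hdisc : (discreteA c || c == 'b') = true := by simp [hb]
        subst hb
        simp [tokB, hcur, scanRunA]
      · have hdisc : (discreteA c || c == 'b') = false := by
          simp [discreteA, hb]; simpa using hd
        rw [show tokB cur (c :: r) = tokB (cur ++ [c]) r by
          simp only [tokB]
          rw [if_neg (by simpa using hd), if_neg (by simp [hb])]]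
        rw [ih (cur ++ [c]) (by simp)]
        have hdisc' : ¬(discreteA c || c == 'b') = true := by simp [hdisc]
        simp only [scanRunA, if_neg hdisc']
        simp

-- Main invariant: A's fused scan produces exactly the prefix plus B's processing of B's tokens.
theorem goA_eq (board : List String) :
    ∀ (n : Nat) (cs : List Char), cs.length ≤ n → ∀ (stage : Nat) (hist : List String),
      goA board cs stage hist = hist ++ procB board stage (tokB [] cs) := by
  intro n
  induction n with
  | zero =>
    intro cs hcs stage hist
    have : cs = [] := List.eq_nil_of_length_eq_zero (Nat.le_zero.mp hcs)
    subst this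
    simp [goA, tokB, procB]
  | succ n ih =>
    intro cs hcs stage hist
    match cs with
    | [] => simp [goA, tokB, procB]
    | a :: rest =>
      have hrest : rest.length ≤ n := by simpa using hcs
      by_cases hda : discreteA a = true
      · by_cases ha : a = '/'
        · subst ha
          rw [show goA board ('/' :: rest) stage hist =
                goA board rest (stage + 1) (hist ++ ["/"] ++
                  [if stage + 1 = 1 then PySem.Str.join "" (PySem.List.slice board none (some 3))
                   else if stage + 1 = 2 then PySem.List.pyGetD board 3 ""
                   else PySem.List.pyGetD board 4 ""]) by
              simp [goA, hda]]
          rw [ih rest hrest]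
          rw [show tokB [] ('/' :: rest) = "/" :: tokB [] rest by simp [tokB]]
          simp [procB]
        · rw [show goA board (a :: rest) stage hist =
                goA board rest stage (hist ++ [String.ofList [a]]) by simp [goA, hda, ha]]
          rw [ih rest hrest]
          rw [show tokB [] (a :: rest) = String.ofList [a] :: tokB [] rest by
            simp only [tokB]
            rw [if_pos (by simpa [discreteA] using hda)]
            simp]
          rw [show procB board stage (String.ofList [a] :: tokB [] rest) =
                String.ofList [a] :: procB board stage (tokB [] rest) by
            simp [procB, ofList_cons_ne_slash a [] ha]]
          simp
      · have ha : ¬a = '/' := fun h => hda (by simp [discreteA, h])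
        rw [show goA board (a :: rest) stage hist =
              goA board (scanRunA rest).2 stage
                (hist ++ [String.ofList (a :: (scanRunA rest).1)]) by
            simp [goA, hda]]
        rw [ih (scanRunA rest).2 (le_trans (scanRunA_rest_le rest) hrest)]
        rw [show tokB [] (a :: rest) = tokB [a] rest by
          simp only [tokB]
          rw [if_neg (by simpa [discreteA] using hda)]
          simp]
        rw [tokB_run rest [a] (by simp)]
        rw [show procB board stage (String.ofList ([a] ++ (scanRunA rest).1) :: tokB [] (scanRunA rest).2) =
              String.ofList (a :: (scanRunA rest).1) :: procB board stage (tokB [] (scanRunA rest).2) by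
            simp [procB, ofList_cons_ne_slash a _ ha]]
        simp

-- ===== VERDICT (by name: the statement is the Claim_ definition above) =====
theorem convert_action_to_history_spec : Claim_equal_convert_action_to_history := by
  intro hole_cards board action isDealer _hdom _hpre
  unfold Spec_convert_action_to_history convert_action_to_history convert_action_to_history_alt
  exact goA_eq board action.toList.length action.toList le_rfl 0 _
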